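-- pv_equiv track=rewrite | github.com/pablouser1/plugin.video.filmin | resources/lib/views/Base.py | getArt
-- ===== SOURCE A (Python) =====
-- def getArt(item: list):
--     """
--     Sorts art for Filmin Menus
--     """
--     poster = None
--     card = None
--     thumb = None
--     for art in item:
--         if art['image_type'] == 'poster':
--             poster = art['path']
--         elif art['image_type'] == 'card':
--             card = art['path']
--         elif art['image_type'] == 'poster-mini':
--             thumb = art['path']
--
--     return {
--         "poster": poster,
--         "card": card,
--         "thumb": thumb
--     }
-- ===== SOURCE B (Python) =====
-- def _last_path(item, image_type):
--     """Path of the last art entry of the given type, scanning back-to-front."""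
--     for art in reversed(item):
--         if art['image_type'] == image_type:
--             return art['path']
--     return None
--
--
-- def getArt(item: list):
--     """
--     Sorts art for Filmin Menus
--     """
--     return {
--         "poster": _last_path(item, 'poster'),
--         "card": _last_path(item, 'card'),
--         "thumb": _last_path(item, 'poster-mini'),
--     }
-- ===== Notes on version B (the rewrite author's own statement) =====
-- stated objective: alternative
-- what changed: Replaces the single forward fold with three accumulators by three independent back-to-front searches, each returning at the first (i.e. last overall) entry of its type; last-wins becomes first-match-on-reversed.
import Mathlib
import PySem

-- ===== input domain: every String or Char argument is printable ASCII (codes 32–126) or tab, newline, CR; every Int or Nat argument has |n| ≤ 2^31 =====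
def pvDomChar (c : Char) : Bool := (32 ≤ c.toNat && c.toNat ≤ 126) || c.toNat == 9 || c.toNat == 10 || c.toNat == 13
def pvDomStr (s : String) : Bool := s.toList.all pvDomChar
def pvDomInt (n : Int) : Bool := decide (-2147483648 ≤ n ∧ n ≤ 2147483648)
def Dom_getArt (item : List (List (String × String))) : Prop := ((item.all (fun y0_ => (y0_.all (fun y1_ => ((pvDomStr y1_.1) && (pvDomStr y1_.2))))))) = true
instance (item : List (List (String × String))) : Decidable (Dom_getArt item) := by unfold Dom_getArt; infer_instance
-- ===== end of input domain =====

-- B replaces A's single forward fold with three accumulators by three independent back-to-front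
-- searches, each stopping at the first (i.e. last overall) entry of its type.

-- ===== PORT A =====
-- each `art` is a Python dict, here an association list; art[k] = first match (KeyError → none, excluded by Pre_)
def pyDictGet? (art : List (String × String)) (k : String) : Option String := List.lookup k art

-- the loop body of A: state is (poster, card, thumb); a missing key on a taken branch is a KeyError in Python (outside Pre_; the port skips the assignment there)
def getArtStepA (s : Option String × Option String × Option String) (art : List (String × String)) :
    Option String × Option String × Option String :=
  match pyDictGet? art "image_type" with
  | some "poster" =>
      match pyDictGet? art "path" with
      | some p => (some p, s.2.1, s.2.2)
      | none => s
  | some "card" =>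
      match pyDictGet? art "path" with
      | some p => (s.1, some p, s.2.2)
      | none => s
  | some "poster-mini" =>
      match pyDictGet? art "path" with
      | some p => (s.1, s.2.1, some p)
      | none => s
  | _ => s

def getArt (item : List (List (String × String))) : List (String × Option String) :=
  let s := item.foldl getArtStepA (none, none, none)
  [("poster", s.1), ("card", s.2.1), ("thumb", s.2.2)]

-- ===== PORT B =====
-- _last_path: scan the reversed list, return art['path'] at the first entry of the wanted type.
-- A missing 'image_type' (or missing 'path' at the returning entry) is a KeyError in Python
-- (outside Pre_; the port returns none there).
def lastPathB (target : String) : List (List (String × String)) → Option String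
  | [] => none
  | art :: rest =>
    match pyDictGet? art "image_type" with
    | some t => if t = target then pyDictGet? art "path" else lastPathB target rest
    | none => none

def getArt_alt (item : List (List (String × String))) : List (String × Option String) :=
  [("poster", lastPathB "poster" item.reverse),
   ("card", lastPathB "card" item.reverse),
   ("thumb", lastPathB "poster-mini" item.reverse)]

-- ===== PRECONDITION & SPEC =====
-- Pre_ excludes exactly the inputs on which Python A raises KeyError (an art without 'image_type',
-- or without 'path' when its image_type is one of the three handled types).
def Pre_getArt (item : List (List (String × String))) : Prop :=
  ∀ art ∈ item, (pyDictGet? art "image_type").isSome ∧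
    (((pyDictGet? art "image_type").getD "") ∈ (["poster", "card", "poster-mini"] : List String) →
      (pyDictGet? art "path").isSome)
instance (item : List (List (String × String))) : Decidable (Pre_getArt item) := by unfold Pre_getArt; infer_instance

def pvWitness_getArt : (List (List (String × String))) :=
  [[("image_type", "poster"), ("path", "a.jpg")], [("image_type", "other")], [("image_type", "card"), ("path", "b.jpg")]]

def Spec_getArt (item : List (List (String × String))) (out : List (String × Option String)) : Prop := out = getArt_alt item
instance (item : List (List (String × String))) (out : List (String × Option String)) : Decidable (Spec_getArt item out) := by unfold Spec_getArt; infer_instance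

-- ===== CLAIM (what is proved, stated in full; the proofs are below) =====
def Claim_equal_getArt : Prop := ∀ (item : List (List (String × String))), Dom_getArt item → Pre_getArt item → Spec_getArt item (getArt item)

-- ===== LEMMAS AND PROOFS =====

-- the Pre_ condition on one art entry
def PreArt (art : List (String × String)) : Prop :=
  (pyDictGet? art "image_type").isSome ∧
    (((pyDictGet? art "image_type").getD "") ∈ (["poster", "card", "poster-mini"] : List String) →
      (pyDictGet? art "path").isSome)

-- under Pre_ on l1, lastPathB splits across an append (a none on l1 means genuinely no match there)
lemma lastPathB_append (target : String) (l1 l2 : List (List (String × String)))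
    (hmem : target ∈ (["poster", "card", "poster-mini"] : List String))
    (h : ∀ art ∈ l1, PreArt art) :
    lastPathB target (l1 ++ l2) = (lastPathB target l1).or (lastPathB target l2) := by
  induction l1 with
  | nil => simp [lastPathB]
  | cons art rest ih =>
    obtain ⟨ht, hp⟩ := h art (List.mem_cons_self ..)
    cases hteq : pyDictGet? art "image_type" with
    | none => rw [hteq] at ht; simp at ht
    | some t =>
      by_cases heq : t = target
      · have hpath : (pyDictGet? art "path").isSome := by
          apply hp; rw [hteq]; simpa [heq] using hmem
        cases hpeq : pyDictGet? art "path" with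
        | none => rw [hpeq] at hpath; simp at hpath
        | some p => simp [lastPathB, hteq, heq, hpeq]
      · simp only [List.cons_append, lastPathB, hteq, if_neg heq]
        exact ih (fun a ha => h a (List.mem_cons_of_mem _ ha))

-- the single-entry case: A's step agrees component-wise with a one-element reversed search
lemma step_single (s : Option String × Option String × Option String)
    (art : List (String × String)) (h : PreArt art) :
    getArtStepA s art = ((lastPathB "poster" [art]).or s.1,
                         (lastPathB "card" [art]).or s.2.1,
                         (lastPathB "poster-mini" [art]).or s.2.2) := by
  obtain ⟨ht, hp⟩ := h
  cases hteq : pyDictGet? art "image_type" with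
  | none => rw [hteq] at ht; simp at ht
  | some t =>
    by_cases hmem : t = "poster" ∨ t = "card" ∨ t = "poster-mini"
    · have hpath : (pyDictGet? art "path").isSome := by
        apply hp; rw [hteq]; rcases hmem with h | h | h <;> simp [h]
      cases hpeq : pyDictGet? art "path" with
      | none => rw [hpeq] at hpath; simp at hpath
      | some p =>
        rcases hmem with h | h | h <;> subst h <;>
          simp [getArtStepA, lastPathB, hteq, hpeq]
    · push Not at hmem
      obtain ⟨h1, h2, h3⟩ := hmem
      unfold getArtStepA
      rw [hteq]
      have : ∀ tg, t ≠ tg → lastPathB tg [art] = none := by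
        intro tg htg; simp [lastPathB, hteq, htg]
      rw [this _ h1, this _ h2, this _ h3]
      split <;> simp_all

-- main loop lemma: the fold over item computes, component-wise, the reversed first-match search
lemma getArt_loop (item : List (List (String × String)))
    (hpre : ∀ art ∈ item, PreArt art) :
    ∀ (s : Option String × Option String × Option String),
      item.foldl getArtStepA s =
        ((lastPathB "poster" item.reverse).or s.1,
         (lastPathB "card" item.reverse).or s.2.1,
         (lastPathB "poster-mini" item.reverse).or s.2.2) := by
  induction item with
  | nil => intro s; simp [lastPathB]
  | cons art rest ih =>
    intro s
    have hrest : ∀ a ∈ rest, PreArt a := fun a ha => hpre a (List.mem_cons_of_mem _ ha)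
    have hrrev : ∀ a ∈ rest.reverse, PreArt a := fun a ha => hrest a (List.mem_reverse.mp ha)
    have hart : PreArt art := hpre art (List.mem_cons_self ..)
    simp only [List.foldl_cons, List.reverse_cons]
    rw [ih hrest, step_single s art hart]
    have happ : ∀ tg ∈ (["poster", "card", "poster-mini"] : List String),
        lastPathB tg (rest.reverse ++ [art]) =
          (lastPathB tg rest.reverse).or (lastPathB tg [art]) :=
      fun tg htg => lastPathB_append tg rest.reverse [art] htg hrrev
    rw [happ "poster" (by simp), happ "card" (by simp), happ "poster-mini" (by simp)]
    simp [Option.or_assoc]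

-- ===== VERDICT (by name: the statement is the Claim_ definition above) =====
theorem getArt_spec : Claim_equal_getArt := by
  intro item _ hpre
  unfold Spec_getArt getArt getArt_alt
  rw [getArt_loop item hpre (none, none, none)]
  simp
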